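/- PORTED by tools/port_fixed.py from Prog/Jsmn/D/Prim.lean to THE FIXED IMAGE fixed/jsmn_d.bin (same bytes at the same addresses; binFD). Do not edit: edit the original and port again. -/
/-
  jsmn_d.bin: **`jsmn_parse_primitive` computes `Jsmn.parsePrimitive`** (174 bytes at 100086H, 62 instructions, one loop, two calls).
  The regions are proved in PrimLoop.lean (prologue, the two halves of the loop body), PrimExit.lean (the five exits) and PrimCall.lean (the two
  call sites); this file joins them: the scanning loop by `Reach.loopOn` (the measure is the model's fuel), and the model equation
  `parsePrimitive … = some (r, p', toks')` read off case by case.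

  COUNTING MODE (tokens == NULL, `toks = none`): the contract gives `tb = 0` and no `Region` for the token array (`Env.toksR : tb = 0 ∨ Region …`);
  the regions that do not touch the array use only `ScanPre.toksW` (the empty window is off the image and off the stack), the two call sites use
  `ScanPre.toksRegion` (there `toks = some ts`).
-/
import Prog.Jsmn.Fixed.Specs
import Prog.Jsmn.Fixed.CodeFD
import Prog.Jsmn.Fixed.D.PrimCall
import X86.Derived.Prog.Reach

namespace X86
namespace J6
namespace FD
open X86.User (CodeAt RegsKept Span FlagsOK Layout toNat_add_ofNat toNat_ofNat_lt' add_ofNat_add)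
open Jsmn JsmnFDBytes

set_option maxRecDepth 100000
set_option maxHeartbeats 4000000
set_option linter.unusedSimpArgs false
set_option linter.unusedVariables false

/-! ### The model equation, case by case (default configuration: `.eoi q` behaves as `.found q`) -/

section Model
variable {js : List UInt8} {fuel : Nat} {p : Parser} {numTokens q : Nat} {res : PrimScan}

theorem pp_bad {toks : Option Tokens} (hscan : primScan Config.default js fuel p.pos = some .bad) :
    parsePrimitive Config.default js fuel p toks numTokens = some (JSMN_ERROR_INVAL, p, toks) := by
  simp [parsePrimitive, hscan]

theorem pp_count (hscan : primScan Config.default js fuel p.pos = some res) (hres : res = .found q ∨ res = .eoi q) :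
    parsePrimitive Config.default js fuel p none numTokens = some (0, { p with pos := u32 ((q : Int) - 1) }, none) := by
  rcases hres with rfl | rfl <;> simp [parsePrimitive, hscan, strict_default]

theorem pp_nomem {ts : Tokens} (hscan : primScan Config.default js fuel p.pos = some res) (hres : res = .found q ∨ res = .eoi q)
    (ha : allocToken Config.default { p with pos := q } ts numTokens = none) :
    parsePrimitive Config.default js fuel p (some ts) numTokens = some (JSMN_ERROR_NOMEM, p, some ts) := by
  rcases hres with rfl | rfl <;> simp [parsePrimitive, hscan, ha, strict_default]

theorem pp_ok {ts ts1 : Tokens} {i : Nat} {p1 : Parser} (hscan : primScan Config.default js fuel p.pos = some res)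
    (hres : res = .found q ∨ res = .eoi q) (ha : allocToken Config.default { p with pos := q } ts numTokens = some (i, p1, ts1)) :
    parsePrimitive Config.default js fuel p (some ts) numTokens =
      some (0, { p1 with pos := u32 ((q : Int) - 1) },
        some (ts1.set i (fillToken (ts1.getD i default) JSMN_PRIMITIVE (i32 p.pos) (i32 q)))) := by
  rcases hres with rfl | rfl <;> simp [parsePrimitive, hscan, ha, strict_default, links_default]

end Model

variable {n : User.Layout} {v0 : User.State} {ret pa jsA tb : Word} {js : List UInt8} {numTokens : Nat} {p : Parser} {toks : Option Tokens}

/-- One trip round the scanning loop, at the loop head with `parser->pos = q` and `k + 1` units of the model's fuel: the function returns with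
the model's answer, or the loop head is reached again with `q + 1` and `k` units. -/
theorem prim_body (halloc : AllocSpec binFD n) (hfill : FillSpec binFD n)
    (hp : ScanPre binFD n binFD.prim binFD.usePrim v0 ret pa jsA tb js numTokens p toks) {fuel : Nat} {r : Int} {p' : Parser}
    {toks' : Option Tokens} {res : PrimScan} (hm : parsePrimitive Config.default js fuel p toks numTokens = some (r, p', toks'))
    (hscan : primScan Config.default js fuel p.pos = some res) (k : Nat) (v : User.State)
    (hi : ∃ q, v.rip = 0x1000af ∧ PrimFrame v0 ret pa tb numTokens p toks { p with pos := q } toks v ∧ PrimRegs jsA tb js numTokens v ∧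
      primScan Config.default js k q = some res) :
    Reach n v (fun v' => ScanPost binFD binFD.usePrim v0 ret pa tb numTokens toks r p' toks' v' ∨
      ∃ k', k' < k ∧ ∃ q, v'.rip = 0x1000af ∧ PrimFrame v0 ret pa tb numTokens p toks { p with pos := q } toks v' ∧
        PrimRegs jsA tb js numTokens v' ∧ primScan Config.default js k' q = some res) := by
  obtain ⟨q, hrip, hf, hr, hk⟩ := hi
  cases k with
  | zero => simp [primScan] at hk
  | succ k =>
  refine (prim_bodyA hp hrip hf hr).trans ?_
  intro v1 ⟨hk1, hm1, hrax1, hcase⟩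
  have hf1 := hf.regs hk1 hm1
  have hr1 := hr.regs hk1 hm1
  rcases hcase with ⟨hrip1, hfound⟩ | ⟨hrip1, hrcx1, hmore, hstop⟩
  · -- `found`: the loop test failed or a stop character
    have hres : res = .found q ∨ res = .eoi q := by
      rcases hfound with hmf | ⟨hmt, hst⟩
      · rw [primScan_eoi hmf] at hk; exact Or.inr (Option.some.inj hk).symm
      · rw [primScan_found hmt hst] at hk; exact Or.inl (Option.some.inj hk).symm
    cases toks with
    | none =>
      rw [pp_count hscan hres] at hm
      simp only [Option.some.injEq, Prod.mk.injEq] at hm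
      obtain ⟨rfl, rfl, rfl⟩ := hm
      exact (prim_count hp hrip1 hf1 hr1 hrax1).mono fun _ h => Or.inl h
    | some ts =>
      have ht := prim_token halloc hfill hp hrip1 hf1 hr1
      cases ha : allocToken Config.default { p with pos := q } ts numTokens with
      | none =>
        rw [pp_nomem hscan hres ha] at hm
        simp only [Option.some.injEq, Prod.mk.injEq] at hm
        obtain ⟨rfl, rfl, rfl⟩ := hm
        rw [ha] at ht
        exact ht.mono fun _ h => Or.inl h
      | some x =>
        obtain ⟨i, p1, ts1⟩ := x
        rw [pp_ok hscan hres ha] at hm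
        simp only [Option.some.injEq, Prod.mk.injEq] at hm
        obtain ⟨rfl, rfl, rfl⟩ := hm
        rw [ha] at ht
        exact ht.mono fun _ h => Or.inl h
  · -- the range check
    refine (prim_bodyB hp hrip1 hf1 hr1 hrax1 hrcx1 (charAt js q).toNat_lt).trans ?_
    intro v2 h2
    rcases h2 with ⟨hrip2, hk2, hm2, hbad⟩ | ⟨hrip2, hf2, hr2, h32, h127⟩
    · rw [primScan_bad hmore hstop hbad] at hk
      have hres : res = .bad := (Option.some.inj hk).symm
      subst hres
      rw [pp_bad hscan] at hm
      simp only [Option.some.injEq, Prod.mk.injEq] at hm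
      obtain ⟨rfl, rfl, rfl⟩ := hm
      exact (prim_inval hp hrip2 (hf1.regs hk2 hm2)).mono fun _ h => Or.inl h
    · exact Reach.done (Or.inr ⟨k, Nat.lt_succ_self k, u32 ((q : Int) + 1), hrip2, hf2, hr2, by
        rw [← primScan_next hmore hstop h32 h127]; exact hk⟩)

/-- **`jsmn_parse_primitive` of jsmn_d.bin computes `Jsmn.parsePrimitive`.** -/
theorem prim_spec (halloc : AllocSpec binFD n) (hfill : FillSpec binFD n) : PrimSpec binFD n := by
  intro v0 ret pa jsA tb js numTokens p toks fuel r p' toks' hp hr8 hm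
  rw [binFD_cfg] at hm
  cases hscan : primScan Config.default js fuel p.pos with
  | none => simp [parsePrimitive, hscan] at hm
  | some res =>
    refine (prim_prologue hp hr8).trans ?_
    intro v ⟨hrip, hf, hr⟩
    exact Reach.loopOn (prim_body halloc hfill hp hm hscan) fuel v ⟨p.pos, hrip, hf, hr, hscan⟩

end FD
end J6
end X86
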